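-- pv_equiv track=rewrite | github.com/twinklelittlestars/PED | codes/utils/dd_utils.py | extract_attributes_thresholds
-- ===== SOURCE A (Python) =====
-- from collections import defaultdict
--
-- def extract_attributes_thresholds(dd_constraints):
--     attribute_thresholds = defaultdict(set)
--     for condition, conclusion in dd_constraints:
--         for attr, (op, threshold) in condition.items():
--             attribute_thresholds[attr].add(threshold)
--         conclusion_attr, (conclusion_op, conclusion_threshold) = conclusion
--         attribute_thresholds[conclusion_attr].add(conclusion_threshold)
--
--     sorted_thresholds = {
--         attr: sorted(list(thresholds), reverse=True)
--         for attr, thresholds in attribute_thresholds.items()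
--     }
--     return sorted_thresholds
-- ===== SOURCE B (Python) =====
-- def extract_attributes_thresholds(dd_constraints):
--     # Flatten every constraint into (attribute, threshold) pairs, sort the flat list
--     # once by threshold descending, then split it into per-attribute groups with an
--     # adjacent-duplicate skip; emit attributes in first-seen order.
--     pairs = []
--     for condition, conclusion in dd_constraints:
--         for attr, (_op, threshold) in condition.items():
--             pairs.append((attr, threshold))
--         conclusion_attr, (_cop, conclusion_threshold) = conclusion
--         pairs.append((conclusion_attr, conclusion_threshold))
--     groups = {}
--     for a, t in sorted(pairs, key=lambda p: p[1], reverse=True):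
--         g = groups.setdefault(a, [])
--         if not g or g[-1] != t:
--             g.append(t)
--     return {a: groups[a] for a in dict.fromkeys(a for a, _ in pairs)}
-- ===== Notes on version B (the rewrite author's own statement) =====
-- stated objective: alternative
-- what changed: A aggregates thresholds into a defaultdict of per-attribute sets while traversing the constraints and sorts each set at the end; B flattens all constraints into one (attribute, threshold) pair list, sorts that flat list once by threshold descending, and splits it into per-attribute lists with an adjacent-duplicate skip, emitting attributes in first-seen order.
import Mathlib
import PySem

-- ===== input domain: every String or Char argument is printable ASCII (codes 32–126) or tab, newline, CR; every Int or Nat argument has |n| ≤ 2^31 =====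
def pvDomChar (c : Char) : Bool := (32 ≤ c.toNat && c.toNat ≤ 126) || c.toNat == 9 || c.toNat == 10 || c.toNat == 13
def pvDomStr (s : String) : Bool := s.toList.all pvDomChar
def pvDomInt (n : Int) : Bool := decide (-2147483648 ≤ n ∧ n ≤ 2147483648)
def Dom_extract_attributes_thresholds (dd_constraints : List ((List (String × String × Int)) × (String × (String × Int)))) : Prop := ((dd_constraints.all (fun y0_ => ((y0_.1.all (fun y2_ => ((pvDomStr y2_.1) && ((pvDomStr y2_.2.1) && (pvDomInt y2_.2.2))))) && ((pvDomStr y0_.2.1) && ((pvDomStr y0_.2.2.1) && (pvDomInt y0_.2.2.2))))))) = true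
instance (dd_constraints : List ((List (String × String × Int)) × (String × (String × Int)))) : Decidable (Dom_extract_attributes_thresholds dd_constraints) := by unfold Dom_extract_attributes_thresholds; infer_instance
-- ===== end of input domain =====

-- B replaces A's per-attribute hash sets + per-key sorts by one flat pair list, a single
-- global sort by threshold descending, and a grouping pass with an adjacent-duplicate skip;
-- objective: alternative algorithm (similar cost).

-- ===== PORT A =====
-- A: fold a defaultdict(set) over the constraints, then sort each set descending.
def extract_attributes_thresholds (dd_constraints : List ((List (String × String × Int)) × (String × (String × Int)))) : List (String × List Int) :=
  let attribute_thresholds : PySem.Dict String (PySem.Set Int) :=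
    dd_constraints.foldl
      (fun d c =>
        let d := ((PySem.Dict.ofList c.1).items).foldl
          (fun d p => d.modify p.1 PySem.Set.empty (fun s => PySem.Set.add s p.2.2)) d
        d.modify c.2.1 PySem.Set.empty (fun s => PySem.Set.add s c.2.2.2))
      PySem.Dict.empty
  attribute_thresholds.items.map (fun p => (p.1, PySem.List.sorted p.2 (fun x => x) true))

-- ===== PORT B =====
-- loop body of B's grouping pass: groups.setdefault(a, []); append t unless it repeats g[-1]
def pvGStep (d : PySem.Dict String (List Int)) (p : String × Int) : PySem.Dict String (List Int) :=
  let d1 := d.setdefault p.1 []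
  let g := d1.getD p.1 []
  if g = [] ∨ g.getLast? ≠ some p.2 then d1.modify p.1 [] (fun x => x ++ [p.2]) else d1

-- B: flatten all constraints into one (attr, threshold) pair list, sort it once by
-- threshold descending, group it with an adjacent-duplicate skip, emit in first-seen order.
def extract_attributes_thresholds_alt (dd_constraints : List ((List (String × String × Int)) × (String × (String × Int)))) : List (String × List Int) :=
  let pairs : List (String × Int) :=
    dd_constraints.foldl
      (fun acc c =>
        (((PySem.Dict.ofList c.1).items).foldl (fun acc p => acc ++ [(p.1, p.2.2)]) acc)
          ++ [(c.2.1, c.2.2.2)])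
      []
  let groups : PySem.Dict String (List Int) :=
    (PySem.List.sorted pairs (fun p => p.2) true).foldl pvGStep PySem.Dict.empty
  (PySem.List.dedup (pairs.map (·.1))).map (fun a => (a, groups.getD a []))

-- ===== PRECONDITION & SPEC =====
def Spec_extract_attributes_thresholds (dd_constraints : List ((List (String × String × Int)) × (String × (String × Int)))) (out : List (String × List Int)) : Prop := out = extract_attributes_thresholds_alt dd_constraints
instance (dd_constraints : List ((List (String × String × Int)) × (String × (String × Int)))) (out : List (String × List Int)) : Decidable (Spec_extract_attributes_thresholds dd_constraints out) := by unfold Spec_extract_attributes_thresholds; infer_instance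

-- ===== CLAIM (what is proved, stated in full; the proofs are below) =====
def Claim_equal_extract_attributes_thresholds : Prop := ∀ (dd_constraints : List ((List (String × String × Int)) × (String × (String × Int)))), Dom_extract_attributes_thresholds dd_constraints → Spec_extract_attributes_thresholds dd_constraints (extract_attributes_thresholds dd_constraints)

-- ===== LEMMAS AND PROOFS =====

-- the flat pair list of one constraint
def pvPairsOf (c : (List (String × String × Int)) × (String × (String × Int))) : List (String × Int) :=
  ((PySem.Dict.ofList c.1).items).map (fun p => (p.1, p.2.2)) ++ [(c.2.1, c.2.2.2)]

-- A's single dict-update step on one flat pair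
def pvStep (d : PySem.Dict String (PySem.Set Int)) (p : String × Int) : PySem.Dict String (PySem.Set Int) :=
  d.modify p.1 PySem.Set.empty (fun s => PySem.Set.add s p.2)

-- B's grouping step seen on one attribute's value list
def pvDStep (g : List Int) (t : Int) : List Int :=
  if g = [] ∨ g.getLast? ≠ some t then g ++ [t] else g

lemma pvPairs_eq (dd : List ((List (String × String × Int)) × (String × (String × Int)))) (acc : List (String × Int)) :
    dd.foldl
      (fun acc c =>
        (((PySem.Dict.ofList c.1).items).foldl (fun acc p => acc ++ [(p.1, p.2.2)]) acc)
          ++ [(c.2.1, c.2.2.2)]) acc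
      = acc ++ dd.flatMap pvPairsOf := by
  induction dd generalizing acc with
  | nil => simp
  | cons c t ih =>
      simp only [List.foldl_cons, ih, List.flatMap_cons]
      rw [PySem.List.foldl_append_singleton_eq_map]
      simp [pvPairsOf]

lemma pvDict_eq (dd : List ((List (String × String × Int)) × (String × (String × Int)))) (d : PySem.Dict String (PySem.Set Int)) :
    dd.foldl
      (fun d c =>
        let d := ((PySem.Dict.ofList c.1).items).foldl
          (fun d p => d.modify p.1 PySem.Set.empty (fun s => PySem.Set.add s p.2.2)) d
        d.modify c.2.1 PySem.Set.empty (fun s => PySem.Set.add s c.2.2.2)) d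
      = (dd.flatMap pvPairsOf).foldl pvStep d := by
  induction dd generalizing d with
  | nil => rfl
  | cons c t ih =>
      simp only [List.foldl_cons, List.flatMap_cons, List.foldl_append, ih]
      congr 1
      simp only [pvPairsOf, List.foldl_append, List.foldl_map, List.foldl_cons, List.foldl_nil]
      rfl

lemma pvGetD_foldl_step (P : List (String × Int)) (d : PySem.Dict String (PySem.Set Int)) (a : String) :
    (P.foldl pvStep d).getD a PySem.Set.empty
      = ((P.filter (fun p => p.1 == a)).map (·.2)).foldl PySem.Set.add (d.getD a PySem.Set.empty) := by
  induction P generalizing d with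
  | nil => rfl
  | cons p t ih =>
      simp only [List.foldl_cons, ih, List.filter_cons]
      by_cases h : p.1 = a
      · simp [h, pvStep]
      · simp [h, pvStep, PySem.Dict.getD_modify, Ne.symm h]

lemma pvKeys_foldl_step (P : List (String × Int)) :
    (P.foldl pvStep PySem.Dict.empty).keys = PySem.Set.ofList (P.map (·.1)) := by
  unfold pvStep
  rw [PySem.Dict.keys_foldl_modify_key P (fun p => p.1) PySem.Set.empty
        (fun _ p => fun s => PySem.Set.add s p.2) PySem.Dict.empty]
  rw [PySem.Dict.keys_empty, PySem.Set.update_nil_left]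

lemma pvNodup_keys_foldl_step (P : List (String × Int)) :
    (P.foldl pvStep PySem.Dict.empty).keys.Nodup := by
  rw [pvKeys_foldl_step]; exact PySem.Set.nodup_ofList _

-- B's grouping fold, read at one attribute, is the pvDStep fold over that attribute's thresholds
lemma pvGStep_getD (d : PySem.Dict String (List Int)) (p : String × Int) (a : String) :
    (pvGStep d p).getD a [] = if p.1 = a then pvDStep (d.getD a []) p.2 else d.getD a [] := by
  by_cases hc : d.contains p.1
  · have hd1 : d.setdefault p.1 [] = d := PySem.Dict.setdefault_of_contains d [] hc
    simp only [pvGStep, hd1, pvDStep]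
    by_cases h : p.1 = a
    · subst h
      split_ifs <;> simp_all [PySem.Dict.getD_modify_self]
    · split_ifs <;>
        simp [PySem.Dict.getD_modify_of_ne d _ _ (Ne.symm h)]
  · have hc' : d.contains p.1 = false := by simpa using hc
    have hd1 : d.setdefault p.1 [] = d.insert p.1 [] :=
      PySem.Dict.setdefault_of_not_contains d [] hc'
    have hg : (d.insert p.1 []).getD p.1 [] = [] := PySem.Dict.getD_insert_self d p.1 [] []
    simp only [pvGStep, hd1, hg]
    rw [if_pos (Or.inl trivial)]
    by_cases h : p.1 = a
    · subst h
      rw [PySem.Dict.getD_modify_self, hg, if_pos rfl, pvDStep,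
        PySem.Dict.getD_of_not_contains d [] hc', if_pos (Or.inl rfl)]
    · rw [PySem.Dict.getD_modify_of_ne _ _ _ (Ne.symm h),
        PySem.Dict.getD_insert_of_ne _ _ _ (Ne.symm h), if_neg h]

lemma pvGetD_gfold (l : List (String × Int)) (d : PySem.Dict String (List Int)) (a : String) :
    (l.foldl pvGStep d).getD a []
      = ((l.filter (fun p => p.1 == a)).map (·.2)).foldl pvDStep (d.getD a []) := by
  induction l generalizing d with
  | nil => rfl
  | cons p t ih =>
      simp only [List.foldl_cons, ih, List.filter_cons, pvGStep_getD]
      by_cases h : p.1 = a <;> simp [h]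

-- in a strictly decreasing list the last element is minimal
lemma pvLast_min (acc : List Int) (h : acc.Pairwise (fun x y => y < x)) :
    ∀ m ∈ acc.getLast?, ∀ x ∈ acc, m ≤ x := by
  induction acc with
  | nil => simp
  | cons b bs ih =>
      rcases List.pairwise_cons.mp h with ⟨hb, hbs⟩
      cases bs with
      | nil => simp
      | cons c cs =>
          intro m hm x hx
          rw [List.getLast?_cons_cons] at hm
          rcases List.mem_cons.mp hx with rfl | hx'
          · exact le_of_lt (hb m (List.mem_of_mem_getLast? hm))
          · exact ih hbs m hm x hx'

-- the adjacent-duplicate-skip fold of a descending (with ties) list: strictly descending,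
-- with exactly the members of the input and the accumulator
lemma pvDStep_fold (l : List Int) (acc : List Int)
    (hl : l.Pairwise (fun x y => y ≤ x))
    (hacc : acc.Pairwise (fun x y => y < x))
    (hconn : ∀ x ∈ l, ∀ y ∈ acc.getLast?, x ≤ y) :
    (l.foldl pvDStep acc).Pairwise (fun x y => y < x)
      ∧ (∀ t, t ∈ l.foldl pvDStep acc ↔ t ∈ acc ∨ t ∈ l) := by
  induction l generalizing acc with
  | nil => exact ⟨hacc, by simp⟩
  | cons t l ih =>
      rcases List.pairwise_cons.mp hl with ⟨ht, hl'⟩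
      simp only [List.foldl_cons]
      by_cases hcond : acc = [] ∨ acc.getLast? ≠ some t
      · have hstep : pvDStep acc t = acc ++ [t] := by simp [pvDStep, hcond]
        rw [hstep]
        have hlt : ∀ x ∈ acc, t < x := by
          intro x hx
          have hne : acc ≠ [] := by rintro rfl; simp at hx
          obtain ⟨m, hm⟩ : ∃ m, acc.getLast? = some m := by
            cases hg : acc.getLast? with
            | none => exact absurd (List.getLast?_eq_none_iff.mp hg) hne
            | some m => exact ⟨m, rfl⟩
          have htm : t ≤ m := hconn t List.mem_cons_self m hm
          have hmx : m ≤ x := pvLast_min acc hacc m hm x hx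
          have htm' : t ≠ m := by
            rcases hcond with hnil | hlast
            · exact absurd hnil hne
            · rintro rfl; exact hlast hm
          exact lt_of_lt_of_le (lt_of_le_of_ne htm htm') hmx
        have hacc' : (acc ++ [t]).Pairwise (fun x y => y < x) := by
          rw [List.pairwise_append]
          exact ⟨hacc, List.pairwise_singleton _ _, by simpa using hlt⟩
        have hconn' : ∀ x ∈ l, ∀ y ∈ (acc ++ [t]).getLast?, x ≤ y := by
          intro x hx y hy
          rw [List.getLast?_concat] at hy
          cases hy
          exact ht x hx
        obtain ⟨h1, h2⟩ := ih (acc ++ [t]) hl' hacc' hconn'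
        refine ⟨h1, fun u => ?_⟩
        rw [h2 u]
        simp only [List.mem_append, List.mem_cons]
        tauto
      · obtain ⟨hne, hlast'⟩ := not_or.mp hcond
        have hlast : acc.getLast? = some t := not_not.mp hlast'
        have hstep : pvDStep acc t = acc := by simp [pvDStep, hne, hlast]
        rw [hstep]
        have htmem : t ∈ acc := List.mem_of_mem_getLast? (hlast ▸ rfl)
        have hconn' : ∀ x ∈ l, ∀ y ∈ acc.getLast?, x ≤ y := by
          intro x hx y hy
          rw [hlast] at hy
          cases hy
          exact ht x hx
        obtain ⟨h1, h2⟩ := ih acc hl' hacc hconn'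
        refine ⟨h1, fun u => ?_⟩
        rw [h2 u]
        simp only [List.mem_cons]
        constructor
        · rintro (h | h)
          · exact Or.inl h
          · exact Or.inr (Or.inr h)
        · rintro (h | rfl | h)
          · exact Or.inl h
          · exact Or.inl htmem
          · exact Or.inr h

-- per attribute: B's grouped list equals A's descending sort of the threshold set
lemma pvPer_attr (P : List (String × Int)) (a : String) :
    PySem.List.sorted (PySem.Set.ofList ((P.filter (fun p => p.1 == a)).map (·.2))) (fun x => x) true
      = (((PySem.List.sorted P (fun p => p.2) true).filter (fun p => p.1 == a)).map (·.2)).foldl pvDStep [] := by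
  set runs := PySem.List.sorted P (fun p => p.2) true with hruns
  set sa := ((runs.filter (fun p => p.1 == a)).map (·.2)) with hsa
  set tsA := ((P.filter (fun p => p.1 == a)).map (·.2)) with htsA
  have hsorted : sa.Pairwise (fun x y => y ≤ x) := by
    rw [hsa, List.pairwise_map]
    exact List.Pairwise.sublist List.filter_sublist
      (PySem.List.sorted_pairwise_rev P (fun p => p.2))
  obtain ⟨h1, h2⟩ := pvDStep_fold sa [] hsorted List.Pairwise.nil (by simp)
  have hperm_sa : sa.Perm tsA := by
    rw [hsa, htsA, hruns]
    exact List.Perm.map _ (List.Perm.filter _ (PySem.List.sorted_perm P (fun p => p.2) true))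
  have hnd : (sa.foldl pvDStep []).Nodup := h1.imp (fun h => h.ne')
  have hperm : (sa.foldl pvDStep []).Perm (PySem.Set.ofList tsA) := by
    rw [List.perm_ext_iff_of_nodup hnd (PySem.Set.nodup_ofList _)]
    intro u
    rw [h2 u, PySem.Set.mem_ofList]
    simp only [List.not_mem_nil, false_or]
    exact hperm_sa.mem_iff
  exact PySem.List.sorted_rev_eq_of_perm_of_pairwise_gt _ _ _ hperm h1

-- ===== VERDICT (by name: the statement is the Claim_ definition above) =====
theorem extract_attributes_thresholds_spec : Claim_equal_extract_attributes_thresholds := by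
  intro dd _
  unfold Spec_extract_attributes_thresholds
  unfold extract_attributes_thresholds extract_attributes_thresholds_alt
  rw [pvPairs_eq dd [], pvDict_eq dd PySem.Dict.empty]
  simp only [List.nil_append]
  set P := dd.flatMap pvPairsOf with hP
  rw [PySem.Dict.items_eq_map_keys _ (pvNodup_keys_foldl_step P) PySem.Set.empty]
  rw [pvKeys_foldl_step, PySem.List.dedup_eq_ofList, List.map_map]
  refine List.map_congr_left (fun a _ => ?_)
  simp only [Function.comp]
  rw [pvGetD_foldl_step, PySem.Dict.getD_empty,
    show (PySem.Set.empty : PySem.Set Int) = [] from rfl,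
    ← PySem.Set.ofList_eq_foldl, pvPer_attr P a, pvGetD_gfold, PySem.Dict.getD_empty]
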